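-- pv_equiv track=rewrite | github.com/Advanced-AIgpt/Yandex-Full-Source | jupytercloud/backend/vcs/arcadia.py | _parse
-- ===== SOURCE A (Python) =====
-- def _parse(error_text):
--     result = []
--     lines = error_text.split('\n')
--
--     for line in lines:
--         line = line.strip()
--
--         if not line or line == 'Changeset contains secret data':
--             continue
--
--         if result and not line.startswith('>'):
--             result[-1] += ' ' + line
--         else:
--             line = ' >' + line.lstrip('>')
--             result.append(line)
--
--     return '\n'.join(result)
-- ===== SOURCE B (Python) =====
-- def _parse(error_text):
--     # Stage 1: normalise -- strip every line and drop empties / the sentinel.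
--     kept = [l for l in map(str.strip, error_text.split('\n'))
--             if l and l != 'Changeset contains secret data']
--     # Stage 2: scan kept by index windows: each group is kept[pos:end] where
--     # end is the next '>'-line after pos; format each window directly.
--     out = []
--     pos = 0
--     n = len(kept)
--     while pos < n:
--         end = pos + 1
--         while end < n and not kept[end].startswith('>'):
--             end += 1
--         group = kept[pos:end]
--         out.append(' '.join([' >' + group[0].lstrip('>')] + group[1:]))
--         pos = end
--     return '\n'.join(out)
-- ===== Notes on version B (the rewrite author's own statement) =====
-- stated objective: alternative
-- what changed: B is staged: it first builds the normalised list of kept lines, then scans it by index windows (pos..end, end = next '>'-line), slicing each window out and formatting it into one output line directly, instead of A's single pass that decides per line whether to append a new string or concatenate onto result[-1].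
import Mathlib
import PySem

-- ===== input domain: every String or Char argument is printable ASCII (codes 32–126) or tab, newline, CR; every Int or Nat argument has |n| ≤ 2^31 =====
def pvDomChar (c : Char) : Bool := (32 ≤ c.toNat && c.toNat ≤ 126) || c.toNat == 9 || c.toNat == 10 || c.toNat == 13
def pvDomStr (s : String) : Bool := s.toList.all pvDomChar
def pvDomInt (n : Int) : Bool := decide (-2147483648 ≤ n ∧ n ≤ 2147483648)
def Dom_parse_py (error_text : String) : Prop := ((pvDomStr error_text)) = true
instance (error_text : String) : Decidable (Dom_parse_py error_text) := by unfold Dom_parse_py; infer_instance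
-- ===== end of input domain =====

-- B first normalises the input into the list of kept lines, then scans that list by
-- index windows (a window = a group) and formats each window directly; alternative
-- decomposition, same cost.

-- ===== PORT A =====
-- one iteration of A's loop over `lines`, state = `result` (strings as List Char)
def parseStepA (result : List (List Char)) (raw : List Char) : List (List Char) :=
  let line := PySem.Chars.strip raw
  if line = [] ∨ line = "Changeset contains secret data".toList then
    result
  else if result ≠ [] ∧ PySem.Chars.startswith line ['>'] = false then
    -- result[-1] += ' ' + line
    result.dropLast ++ [result.getLast! ++ (' ' :: line)]
  else
    -- line = ' >' + line.lstrip('>'); lstrip('>') ported by hand: drop the leading '>' chars (exact)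
    result ++ [' ' :: '>' :: line.dropWhile (· == '>')]

def parse_py (error_text : String) : String :=
  let lines := PySem.Chars.splitOn error_text.toList ['\n']
  String.mk (PySem.Chars.join ['\n'] (lines.foldl parseStepA []))

-- ===== PORT B =====
-- stage 1 of Source B: kept = [l for l in map(str.strip, error_text.split('\n')) if l and l != sentinel]
def keptB (error_text : String) : List (List Char) :=
  ((PySem.Chars.splitOn error_text.toList ['\n']).map PySem.Chars.strip).filter
    (fun l => !(l = [] ∨ l = "Changeset contains secret data".toList : Bool))

-- a line not starting with '>' (the inner scan's continue-condition)
def notStartB (l : List Char) : Bool := !PySem.Chars.startswith l ['>']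

-- ' '.join([' >' + group[0].lstrip('>')] + group[1:])  (group nonempty by construction)
def fmtGroupB (g : List (List Char)) : List Char :=
  PySem.Chars.join [' '] ((' ' :: '>' :: (g.headD []).dropWhile (· == '>')) :: g.tail)

-- stage 2 of Source B: the outer while loop over pos, recursion on the suffix kept[pos:];
-- the inner scan for `end` and the slice kept[pos:end] are exactly h :: t.takeWhile notStartB,
-- and the next suffix kept[end:] is t.dropWhile notStartB (exact).
def groupsB : List (List Char) → List (List Char)
  | [] => []
  | h :: t =>
      fmtGroupB (h :: t.takeWhile notStartB) :: groupsB (t.dropWhile notStartB)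
  termination_by ls => ls.length
  decreasing_by
    simpa using Nat.lt_succ_of_le (List.length_dropWhile_le notStartB t)

def parse_py_alt (error_text : String) : String :=
  String.mk (PySem.Chars.join ['\n'] (groupsB (keptB error_text)))

-- ===== PRECONDITION & SPEC =====
def Spec_parse_py (error_text : String) (out : String) : Prop := out = parse_py_alt error_text
instance (error_text : String) (out : String) : Decidable (Spec_parse_py error_text out) := by
  unfold Spec_parse_py; infer_instance

-- ===== CLAIM (what is proved, stated in full; the proofs are below) =====
def Claim_equal_parse_py : Prop :=
  ∀ (error_text : String), Dom_parse_py error_text → Spec_parse_py error_text (parse_py error_text)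

-- ===== LEMMAS AND PROOFS =====

-- A's loop step on an already-kept (stripped, non-skipped) line
def stepA2 (result : List (List Char)) (line : List Char) : List (List Char) :=
  if result ≠ [] ∧ PySem.Chars.startswith line ['>'] = false then
    result.dropLast ++ [result.getLast! ++ (' ' :: line)]
  else
    result ++ [' ' :: '>' :: line.dropWhile (· == '>')]

lemma getLast!_concat' (xs : List (List Char)) (x : List Char) : (xs ++ [x]).getLast! = x :=
  List.getLast!_of_getLast? List.getLast?_concat

lemma self_eq_dropLast_getLast! (res : List (List Char)) (h : res ≠ []) :
    res.dropLast ++ [res.getLast!] = res := by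
  obtain ⟨xs, x, rfl⟩ := (List.eq_nil_or_concat res).resolve_left h
  simp [List.concat_eq_append, getLast!_concat' xs x]

-- A's fold over the raw lines is the fold of stepA2 over the kept (stripped, filtered) lines
lemma foldA_kept : ∀ (lines : List (List Char)) (acc : List (List Char)),
    lines.foldl parseStepA acc
      = ((lines.map PySem.Chars.strip).filter
          (fun l => !(l = [] ∨ l = "Changeset contains secret data".toList : Bool))).foldl stepA2 acc
  | [], _ => rfl
  | raw :: rest, acc => by
      simp only [List.foldl_cons, List.map_cons, List.filter_cons]
      by_cases hskip : PySem.Chars.strip raw = [] ∨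
          PySem.Chars.strip raw = "Changeset contains secret data".toList
      · rw [show parseStepA acc raw = acc from by
            simp only [parseStepA]; rw [if_pos hskip]]
        simp only [hskip, decide_true, Bool.not_true, Bool.false_eq_true, if_false]
        exact foldA_kept rest acc
      · rw [show parseStepA acc raw = stepA2 acc (PySem.Chars.strip raw) from by
            simp only [parseStepA, stepA2]; rw [if_neg hskip]]
        simp only [hskip, decide_false, Bool.not_false, if_true, List.foldl_cons]
        exact foldA_kept rest _
  termination_by lines => lines.length

-- the characters A appends to the open group while consuming the continuation lines of ls
def contChars (ls : List (List Char)) : List Char :=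
  (ls.takeWhile notStartB).foldr (fun l acc => (' ' :: l) ++ acc) []

-- ' '.join of a nonempty list, unfolded to head ++ foldr of ' '-prefixed tails
lemma join_space (x : List Char) : ∀ (xs : List (List Char)),
    PySem.Chars.join [' '] (x :: xs) = x ++ xs.foldr (fun l acc => (' ' :: l) ++ acc) []
  | [] => by simp [PySem.Chars.join_singleton]
  | y :: ys => by
      rw [PySem.Chars.join_cons_cons, join_space y ys]
      simp

-- formatted head group = formatted head line ++ the continuation characters
lemma fmt_head_cont (h : List Char) (t : List (List Char)) :
    fmtGroupB (h :: t.takeWhile notStartB)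
      = (' ' :: '>' :: h.dropWhile (· == '>')) ++ contChars t := by
  simp only [fmtGroupB, List.headD_cons, List.tail_cons, contChars]
  exact join_space _ _

-- main invariant: with a nonempty open result, A's remaining fold extends the last
-- string by the continuation characters and then produces exactly B's remaining groups
lemma foldA2_inv : ∀ (ls res : List (List Char)), res ≠ [] →
    ls.foldl stepA2 res
      = res.dropLast ++ [res.getLast! ++ contChars ls] ++ groupsB (ls.dropWhile notStartB)
  | [], res, h => by
      rw [List.dropWhile_nil, show groupsB [] = [] from by rw [groupsB]]
      simp only [contChars, List.takeWhile_nil, List.foldr_nil, List.append_nil]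
      rw [self_eq_dropLast_getLast! res h]
      simp
  | l :: t, res, h => by
      by_cases hs : PySem.Chars.startswith l ['>'] = true
      · have hns : notStartB l = false := by simp [notStartB, hs]
        rw [show (l :: t).foldl stepA2 res
              = t.foldl stepA2 (res ++ [' ' :: '>' :: l.dropWhile (· == '>')]) from by
            simp only [List.foldl_cons, stepA2]
            rw [if_neg (by rintro ⟨-, h2⟩; rw [hs] at h2; cases h2)]]
        rw [foldA2_inv t _ (by simp)]
        rw [List.dropLast_concat, getLast!_concat']
        rw [show (l :: t).dropWhile notStartB = l :: t from
            List.dropWhile_cons_of_neg (by simp [hns])]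
        rw [show contChars (l :: t) = [] from by
            simp only [contChars]
            rw [List.takeWhile_cons_of_neg (by simp [hns])]
            rfl]
        rw [show groupsB (l :: t)
              = fmtGroupB (l :: t.takeWhile notStartB) :: groupsB (t.dropWhile notStartB) from by
            rw [groupsB]]
        rw [fmt_head_cont l t]
        rw [show res.dropLast ++ [res.getLast! ++ []]
              = res.dropLast ++ [res.getLast!] from by simp]
        rw [self_eq_dropLast_getLast! res h]
        simp
      · have hns : notStartB l = true := by simp [notStartB, hs]
        rw [show (l :: t).foldl stepA2 res
              = t.foldl stepA2 (res.dropLast ++ [res.getLast! ++ (' ' :: l)]) from by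
            simp only [List.foldl_cons, stepA2]
            rw [if_pos ⟨h, by simpa using hs⟩]]
        rw [foldA2_inv t _ (by simp)]
        rw [List.dropLast_concat, getLast!_concat']
        rw [show (l :: t).dropWhile notStartB = t.dropWhile notStartB from
            List.dropWhile_cons_of_pos hns]
        rw [show contChars (l :: t) = (' ' :: l) ++ contChars t from by
            simp only [contChars]
            rw [List.takeWhile_cons_of_pos hns]
            rfl]
        simp
  termination_by ls => ls.length

-- fold of stepA2 from the empty result over the kept lines = B's formatted groups
lemma foldA2_groups (kept : List (List Char)) :
    kept.foldl stepA2 [] = groupsB kept := by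
  cases kept with
  | nil => rw [show groupsB [] = [] from by rw [groupsB]]; rfl
  | cons h t =>
      rw [show (h :: t).foldl stepA2 []
            = t.foldl stepA2 [' ' :: '>' :: h.dropWhile (· == '>')] from by
          simp [stepA2]]
      rw [foldA2_inv t _ (by simp)]
      rw [show groupsB (h :: t)
            = fmtGroupB (h :: t.takeWhile notStartB) :: groupsB (t.dropWhile notStartB) from by
          rw [groupsB]]
      rw [fmt_head_cont h t]
      simp

-- ===== VERDICT (by name: the statement is the Claim_ definition above) =====
theorem parse_py_spec : Claim_equal_parse_py := by
  intro error_text _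
  show _ = _
  rw [parse_py, parse_py_alt, foldA_kept, foldA2_groups]
  rfl
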